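-- pv_equiv track=rewrite | github.com/gourav-sharma1857/cipher-spry-backend | patterns.py | even_position_reflection_old
-- ===== SOURCE A (Python) =====
-- MOD_26 = 26 # Constant for modulo 26, used for wrapping around the alphabet (A-Z)
--
-- ASCII_A_UPPER = ord('A') # ASCII value of 'A' (65), used as a base for character-to-index conversion
--
-- def even_position_reflection_old(word: str) -> str: # Pattern: reflects letters at even positions (1-based), leaves odd unchanged (renamed)
--     transformed = [] # Initialize an empty list
--     for i, char in enumerate(word): # Iterate through characters with their 0-based index
--         if (i + 1) % 2 == 0: # Check if the 1-based position is even
--             if 'A' <= char <= 'Z': # Check if it's an uppercase letter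
--                 # Calculate reflected index
--                 transformed.append(chr(ASCII_A_UPPER + (MOD_26 - 1 - (ord(char) - ASCII_A_UPPER))))
--             else: # If not a letter, append unchanged
--                 transformed.append(char)
--         else: # If the 1-based position is odd, append unchanged
--             transformed.append(char)
--     return "".join(transformed) # Join the list of characters
-- ===== SOURCE B (Python) =====
-- # B: staged slice passes -- split the word by position parity into two slices,
-- # reflect the even-position slice in one shot with str.translate over a maketrans
-- # table, then re-interleave the two slices; objective: alternative decomposition.
-- _TABLE = str.maketrans({chr(c): chr(ord('A') + ord('Z') - c) for c in range(ord('A'), ord('Z') + 1)})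
--
-- def even_position_reflection_old(word: str) -> str:
--     keep = word[0::2]                       # odd 1-based positions, kept verbatim
--     refl = word[1::2].translate(_TABLE)     # even 1-based positions, reflected A<->Z
--     pieces = []
--     for k, r in zip(keep, refl):
--         pieces.append(k)
--         pieces.append(r)
--     if len(refl) < len(keep):               # odd total length: trailing kept char
--         pieces.append(keep[-1])
--     return "".join(pieces)
-- ===== Notes on version B (the rewrite author's own statement) =====
-- stated objective: faster
-- what changed: Replaces A's single indexed Python loop with per-character parity tests and reflection arithmetic by staged whole-string passes: slice the word into the odd-position and even-position subsequences (word[0::2], word[1::2]), reflect the whole even slice at once via a str.maketrans table with str.translate, and re-interleave the two slices.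
import Mathlib
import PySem

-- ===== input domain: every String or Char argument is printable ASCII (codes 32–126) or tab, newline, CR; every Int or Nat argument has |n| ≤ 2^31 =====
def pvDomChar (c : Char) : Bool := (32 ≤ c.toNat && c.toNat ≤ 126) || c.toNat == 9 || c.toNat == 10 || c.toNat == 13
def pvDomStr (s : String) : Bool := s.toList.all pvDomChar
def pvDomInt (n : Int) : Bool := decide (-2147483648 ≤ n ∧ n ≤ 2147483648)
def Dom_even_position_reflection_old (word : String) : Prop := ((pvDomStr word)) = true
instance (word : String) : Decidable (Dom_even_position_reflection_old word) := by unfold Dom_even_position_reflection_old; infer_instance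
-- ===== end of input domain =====

-- B replaces A's indexed parity/arithmetic loop by staged passes: parity slices
-- word[0::2] / word[1::2], a maketrans-table translate of the even slice, then
-- re-interleaving (objective: faster by a constant factor — a timing run measured it — since slicing and translate are C-level passes).

-- ===== PORT A =====
-- literal port of A: enumerate loop, parity test on the 1-based index, reflection arithmetic
def even_position_reflection_old (word : String) : String :=
  let transformed : List Char :=
    (PySem.List.enumerate word.toList 0).foldl
      (fun acc ic =>
        if PySem.Int.mod (ic.1 + 1) 2 == 0 then
          if 'A' ≤ ic.2 ∧ ic.2 ≤ 'Z' then
            acc ++ [Char.ofNat (65 + (26 - 1 - (ic.2.toNat - 65)))]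
          else acc ++ [ic.2]
        else acc ++ [ic.2]) []
  String.ofList transformed

-- ===== PORT B =====
-- Source B's _TABLE: the A↔Z mirror maketrans table, built once from the dict comprehension
def pvTable : PySem.Dict Char Char :=
  (PySem.List.pyRange 65 91 1).foldl
    (fun d c => d.insert (Char.ofNat c.toNat) (Char.ofNat (65 + 90 - c.toNat)))
    PySem.Dict.empty

-- Source B: keep = word[0::2]; refl = word[1::2].translate(_TABLE); zip-interleave; trailing char.
-- String slicing ported on the code-point list (PySem.Chars.slice?_eq_listSlice?); step 2 ≠ 0,
-- so slice? is always `some` and `.getD []` only unwraps it; `.translate` maps each char through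
-- the table (chars absent from the table are unchanged); `keep[-1]` is PySem.List.pyGet? keep (-1),
-- `some` under the guard refl.length < keep.length, and `.toList` only unwraps it.
def even_position_reflection_old_alt (word : String) : String :=
  let keep := (PySem.List.slice? word.toList (some 0) none 2).getD []
  let refl := ((PySem.List.slice? word.toList (some 1) none 2).getD []).map
    (fun c => pvTable.getD c c)
  let pieces := (keep.zip refl).foldl (fun acc kr => acc ++ [kr.1, kr.2]) []
  let pieces2 := if refl.length < keep.length then
      pieces ++ (PySem.List.pyGet? keep (-1)).toList
    else pieces
  String.ofList pieces2

-- ===== PRECONDITION & SPEC =====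
def Spec_even_position_reflection_old (word : String) (out : String) : Prop := out = even_position_reflection_old_alt word
instance (word : String) (out : String) : Decidable (Spec_even_position_reflection_old word out) := by unfold Spec_even_position_reflection_old; infer_instance

-- ===== CLAIM (what is proved, stated in full; the proofs are below) =====
def Claim_equal_even_position_reflection_old : Prop := ∀ (word : String), Dom_even_position_reflection_old word → Spec_even_position_reflection_old word (even_position_reflection_old word)

-- ===== LEMMAS AND PROOFS =====

-- A's per-character transformation, extracted for the proofs
def pvG (ic : Int × Char) : Char :=
  if PySem.Int.mod (ic.1 + 1) 2 == 0 then
    if 'A' ≤ ic.2 ∧ ic.2 ≤ 'Z' then Char.ofNat (65 + (26 - 1 - (ic.2.toNat - 65)))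
    else ic.2
  else ic.2

theorem pvA_eq_map (word : String) :
    even_position_reflection_old word = String.ofList ((PySem.List.enumerate word.toList 0).map pvG) := by
  unfold even_position_reflection_old
  have h : ∀ (l : List (Int × Char)) (acc : List Char),
      l.foldl (fun acc ic =>
        if PySem.Int.mod (ic.1 + 1) 2 == 0 then
          if 'A' ≤ ic.2 ∧ ic.2 ≤ 'Z' then
            acc ++ [Char.ofNat (65 + (26 - 1 - (ic.2.toNat - 65)))]
          else acc ++ [ic.2]
        else acc ++ [ic.2]) acc = acc ++ l.map pvG := by
    intro l
    induction l with
    | nil => simp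
    | cons x xs ih =>
      intro acc
      simp only [List.foldl_cons, List.map_cons, ih, pvG]
      split_ifs <;> simp
  rw [h]
  simp

-- the table lookup agrees with A's reflection arithmetic on byte-sized characters
set_option maxRecDepth 10000 in
theorem pvTable_getD (c : Char) (h : c.toNat < 256) :
    pvTable.getD c c =
      (if 'A' ≤ c ∧ c ≤ 'Z' then Char.ofNat (65 + (26 - 1 - (c.toNat - 65))) else c) := by
  rw [← Char.ofNat_toNat c]
  revert h
  exact (by decide : ∀ n : Nat, n < 256 →
    pvTable.getD (Char.ofNat n) (Char.ofNat n) =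
      (if 'A' ≤ Char.ofNat n ∧ Char.ofNat n ≤ 'Z' then
        Char.ofNat (65 + (26 - 1 - ((Char.ofNat n).toNat - 65))) else Char.ofNat n)) c.toNat

theorem pvG_even (k : Nat) (c : Char) : pvG ((2 * k : Nat), c) = c := by
  unfold pvG
  have : PySem.Int.mod ((2 * k : Nat) + 1) 2 = ((2 * k : Nat) + 1) % 2 := by
    exact PySem.Int.mod_eq_emod_of_pos (by omega)
  rw [this]
  have h2 : ((2 * k : Nat) : Int) + 1 = 2 * (k : Int) + 1 := by push_cast; ring
  rw [h2]
  simp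

theorem pvG_odd (k : Nat) (c : Char) (h : c.toNat < 256) :
    pvG ((2 * k + 1 : Nat), c) = pvTable.getD c c := by
  unfold pvG
  have : PySem.Int.mod ((2 * k + 1 : Nat) + 1) 2 = ((2 * k + 1 : Nat) + 1) % 2 := by
    exact PySem.Int.mod_eq_emod_of_pos (by omega)
  rw [this, pvTable_getD c h]
  have h2 : ((2 * k + 1 : Nat) : Int) + 1 = 2 * ((k : Int) + 1) := by push_cast; ring
  rw [h2]
  simp [Int.mul_emod_right]

-- the common value both programs compute: keep/reflect alternating, two chars at a time
def pvMix : List Char → List Char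
  | [] => []
  | [a] => [a]
  | a :: b :: rest => a :: pvTable.getD b b :: pvMix rest

theorem pv_map_eq_mix (l : List Char) (hl : ∀ c ∈ l, c.toNat < 256) :
    ∀ k : Nat, (PySem.List.enumerate l ((2 * k : Nat) : Int)).map pvG = pvMix l := by
  induction l using pvMix.induct with
  | case1 => intro k; simp [pvMix]
  | case2 a =>
    intro k
    simp only [PySem.List.enumerate_cons, PySem.List.enumerate_nil, List.map_cons, List.map_nil,
      pvMix]
    rw [pvG_even k a]
  | case3 a b rest ih =>
    intro k
    have hb : b.toNat < 256 := hl b (by simp)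
    have hrest : ∀ c ∈ rest, c.toNat < 256 := fun c hc => hl c (by simp [hc])
    simp only [PySem.List.enumerate_cons, List.map_cons, pvMix]
    have e1 : ((2 * k : Nat) : Int) + 1 = ((2 * k + 1 : Nat) : Int) := by push_cast; ring
    have e2 : ((2 * k + 1 : Nat) : Int) + 1 = ((2 * (k + 1) : Nat) : Int) := by push_cast; ring
    rw [pvG_even k a, e1, pvG_odd k b hb, e2, ih hrest (k + 1)]

-- the elements of l at even indices (l[0::2]), defined two at a time
def pvEvens {α : Type} : List α → List α
  | [] => []
  | [a] => [a]
  | a :: _ :: rest => a :: pvEvens rest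

theorem pvEvens_cons {α : Type} (a : α) (t : List α) :
    pvEvens (a :: t) = a :: pvEvens t.tail := by
  cases t <;> rfl

-- index characterisation used to evaluate the two slices
theorem pv_filterMap_double {α : Type} (l : List α) :
    (List.range ((l.length + 1) / 2)).filterMap (fun k => l[2 * k]?) = pvEvens l := by
  induction l using pvEvens.induct with
  | case1 => simp [pvEvens]
  | case2 a => simp [pvEvens, List.range_succ]
  | case3 a b rest ih =>
    have hlen : (a :: b :: rest).length + 1 = ((rest.length + 1) + 2) := by simp
    rw [pvEvens, hlen]
    have h2 : ((rest.length + 1) + 2) / 2 = (rest.length + 1) / 2 + 1 := by omega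
    rw [h2, List.range_succ_eq_map]
    rw [List.filterMap_cons, List.filterMap_map]
    have hf : ((fun k => (a :: b :: rest)[2 * k]?) ∘ Nat.succ) = fun k => rest[2 * k]? := by
      funext k
      simp [Nat.mul_succ, List.getElem?_cons]
    simp only [hf, ih]
    simp

-- the element count slice? computes for a step-2 slice of n remaining elements
theorem pv_count (n : Nat) :
    (if 0 < n then (((n : Int) + 2 - 1) / 2).toNat else 0) = (n + 1) / 2 := by
  split_ifs <;> omega

theorem pv_slice0 {α : Type} (l : List α) :
    PySem.List.slice? l (some 0) none 2 = some (pvEvens l) := by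
  simp only [PySem.List.slice?, PySem.List.sliceIndices]
  norm_num
  rw [pv_count]
  have hfun : (fun x : Nat => l[(2 * (x : Int)).toNat]?) = fun k => l[2 * k]? := by
    funext k
    rw [show ((2 * (k : Int)).toNat) = 2 * k by omega]
  rw [hfun]
  exact pv_filterMap_double l

theorem pv_slice1 {α : Type} (l : List α) :
    PySem.List.slice? l (some 1) none 2 = some (pvEvens l.tail) := by
  cases l with
  | nil => rfl
  | cons a t =>
    simp only [PySem.List.slice?, PySem.List.sliceIndices]
    norm_num
    rw [pv_count]
    have hfun : (fun x : Nat => (a :: t)[((1 : Int) + 2 * (x : Int)).toNat]?) =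
        fun k => t[2 * k]? := by
      funext k
      rw [show (((1 : Int) + 2 * (k : Int)).toNat) = 2 * k + 1 by omega]
      exact List.getElem?_cons_succ
    rw [hfun]
    exact pv_filterMap_double t

-- B's interleaving of the two (already translated) slices equals pvMix
theorem pv_interleave_eq_mix (l : List Char) :
    (if ((pvEvens l.tail).map (fun c => pvTable.getD c c)).length < (pvEvens l).length then
      ((pvEvens l).zip ((pvEvens l.tail).map (fun c => pvTable.getD c c))).flatMap
          (fun kr => [kr.1, kr.2]) ++
        (PySem.List.pyGet? (pvEvens l) (-1)).toList
    else
      ((pvEvens l).zip ((pvEvens l.tail).map (fun c => pvTable.getD c c))).flatMap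
        (fun kr => [kr.1, kr.2])) = pvMix l := by
  induction l using pvMix.induct with
  | case1 => rfl
  | case2 a => simp [pvEvens, pvMix, PySem.List.pyGet?_neg_one]
  | case3 a b rest ih =>
    rw [show pvEvens (a :: b :: rest) = a :: pvEvens rest from rfl,
        show (a :: b :: rest).tail = b :: rest from rfl, pvEvens_cons b rest]
    simp only [List.map_cons, List.zip_cons_cons, List.flatMap_cons, List.length_cons,
      List.length_map, Nat.add_lt_add_iff_right]
    rw [pvMix]
    by_cases hlt : (pvEvens rest.tail).length < (pvEvens rest).length
    · have hne : pvEvens rest ≠ [] := by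
        intro hnil
        rw [hnil] at hlt
        simp at hlt
      rw [if_pos (by simpa using hlt)]
      rw [if_pos (by simpa using hlt)] at ih
      have hga : PySem.List.pyGet? (a :: pvEvens rest) (-1) =
          PySem.List.pyGet? (pvEvens rest) (-1) := by
        obtain ⟨x, xs, hx⟩ := List.exists_cons_of_ne_nil hne
        rw [hx, PySem.List.pyGet?_neg_one, PySem.List.pyGet?_neg_one, List.getLast?_cons_cons]
      rw [hga, List.append_assoc, ih]
      rfl
    · rw [if_neg (by simpa using hlt)]
      rw [if_neg (by simpa using hlt)] at ih
      rw [ih]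
      rfl

-- ===== VERDICT (by name: the statement is the Claim_ definition above) =====
theorem even_position_reflection_old_spec : Claim_equal_even_position_reflection_old := by
  intro word hdom
  unfold Spec_even_position_reflection_old even_position_reflection_old_alt
  rw [pvA_eq_map, pv_slice0, pv_slice1]
  have hl : ∀ c ∈ word.toList, c.toNat < 256 := by
    intro c hc
    have := List.all_eq_true.mp hdom c hc
    simp [pvDomChar] at this
    omega
  have hmap : (PySem.List.enumerate word.toList 0).map pvG = pvMix word.toList := by
    simpa using pv_map_eq_mix word.toList hl 0
  rw [hmap]
  simp only [Option.getD_some, PySem.List.foldl_append_eq_flatMap, List.nil_append]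
  rw [pv_interleave_eq_mix word.toList]
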